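-- pv_equiv track=rewrite | github.com/diyarkudrat/bas_temperature_control_bas_system | server/auth/middleware.py | _claims_has_permission
-- ===== SOURCE A (Python) =====
-- from typing import Dict, Tuple, Optional, Any, List
--
-- def _claims_has_permission(user_roles: List[str], required_role: str) -> bool:
--     """Check if any of the user's roles satisfies the required role using hierarchy."""
--     normalized = set(r.lower() for r in user_roles)
--     if required_role == 'read-only':
--         return bool(normalized & {'read-only', 'operator', 'admin'})
--     if required_role == 'operator':
--         return bool(normalized & {'operator', 'admin'})
--     if required_role == 'admin':
--         return 'admin' in normalized
--     return False
-- ===== SOURCE B (Python) =====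
-- _RANK = {'read-only': 1, 'operator': 2, 'admin': 3}
--
-- def _claims_has_permission(user_roles, required_role):
--     required = _RANK.get(required_role)
--     if required is None:
--         return False
--     user_level = max((_RANK.get(r.lower(), 0) for r in user_roles), default=0)
--     return user_level >= required
-- ===== Notes on version B (the rewrite author's own statement) =====
-- stated objective: simpler
-- what changed: Replaces the branch-per-role set intersections (build a lowered set, intersect it with a hierarchy set per branch) with a single numeric rank map: one pass folds the user's roles to their maximal rank, which is compared against the required role's threshold.
import Mathlib
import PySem

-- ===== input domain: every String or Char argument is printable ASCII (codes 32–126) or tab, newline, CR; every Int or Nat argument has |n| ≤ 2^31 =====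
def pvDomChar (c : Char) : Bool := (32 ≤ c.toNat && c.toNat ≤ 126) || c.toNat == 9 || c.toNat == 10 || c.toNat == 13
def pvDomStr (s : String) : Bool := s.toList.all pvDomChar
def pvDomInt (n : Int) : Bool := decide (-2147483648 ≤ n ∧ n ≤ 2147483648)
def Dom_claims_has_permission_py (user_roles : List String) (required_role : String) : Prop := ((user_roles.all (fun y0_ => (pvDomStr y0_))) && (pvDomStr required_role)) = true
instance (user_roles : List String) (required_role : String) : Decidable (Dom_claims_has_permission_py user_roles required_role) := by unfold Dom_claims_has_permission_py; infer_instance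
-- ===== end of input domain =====

-- B replaces the branch-per-role set intersections with a single rank map:
-- the maximal rank of the user's roles is compared against the required role's threshold. (objective: simpler)

-- ===== PORT A =====
def claims_has_permission_py (user_roles : List String) (required_role : String) : Bool :=
  let normalized : PySem.Set String := PySem.Set.ofList (user_roles.map PySem.Str.lower)
  if required_role == "read-only" then
    !(PySem.Set.inter normalized ["read-only", "operator", "admin"]).isEmpty
  else if required_role == "operator" then
    !(PySem.Set.inter normalized ["operator", "admin"]).isEmpty
  else if required_role == "admin" then
    PySem.Set.contains normalized "admin"
  else
    false

-- ===== PORT B =====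
def pvRankB : PySem.Dict String Int := PySem.Dict.mk [("read-only", (1 : Int)), ("operator", (2 : Int)), ("admin", (3 : Int))]

def claims_has_permission_py_alt (user_roles : List String) (required_role : String) : Bool :=
  match pvRankB.get? required_role with
  | none => false
  | some required =>
    -- max(generator, default=0) as a fold with accumulator 0
    let user_level := user_roles.foldl (fun m r => max m (pvRankB.getD (PySem.Str.lower r) 0)) 0
    decide (user_level ≥ required)

-- ===== PRECONDITION & SPEC =====
def Spec_claims_has_permission_py (user_roles : List String) (required_role : String) (out : Bool) : Prop := out = claims_has_permission_py_alt user_roles required_role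
instance (user_roles : List String) (required_role : String) (out : Bool) : Decidable (Spec_claims_has_permission_py user_roles required_role out) := by unfold Spec_claims_has_permission_py; infer_instance

-- ===== CLAIM (what is proved, stated in full; the proofs are below) =====
def Claim_equal_claims_has_permission_py : Prop := ∀ (user_roles : List String) (required_role : String), Dom_claims_has_permission_py user_roles required_role → Spec_claims_has_permission_py user_roles required_role (claims_has_permission_py user_roles required_role)

-- ===== LEMMAS AND PROOFS =====

-- the fold's max reaches threshold k iff the accumulator or some role's rank does
theorem foldl_max_ge (l : List String) (a k : Int) :
    (l.foldl (fun m r => max m (pvRankB.getD (PySem.Str.lower r) 0)) a ≥ k)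
      ↔ (a ≥ k ∨ ∃ r ∈ l, pvRankB.getD (PySem.Str.lower r) 0 ≥ k) := by
  induction l generalizing a with
  | nil => simp
  | cons x xs ih =>
    simp only [List.foldl_cons, ih, le_max_iff, List.mem_cons, ge_iff_le]
    aesop

theorem inter_nonempty_iff (s t : List String) :
    (!(PySem.Set.inter (PySem.Set.ofList s) t).isEmpty) = true ↔ ∃ x ∈ s, x ∈ t := by
  simp [PySem.Set.inter, List.filter_eq_nil_iff, PySem.Set.mem_ofList]

theorem rank_cases (r : String) :
    pvRankB.getD r 0 =
      (if r = "read-only" then 1 else if r = "operator" then 2 else if r = "admin" then 3 else 0) := by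
  by_cases h1 : r = "read-only"
  · subst h1; decide
  · by_cases h2 : r = "operator"
    · subst h2; decide
    · by_cases h3 : r = "admin"
      · subst h3; decide
      · simp [pvRankB, PySem.Dict.getD_eq_get?_getD, PySem.Dict.get?, Ne.symm h1, Ne.symm h2, Ne.symm h3, h1, h2, h3]

theorem rank_ge_one (r : String) :
    (pvRankB.getD r 0 ≥ 1) ↔ r ∈ ["read-only", "operator", "admin"] := by
  rw [rank_cases]; split_ifs <;> simp_all

theorem rank_ge_two (r : String) :
    (pvRankB.getD r 0 ≥ 2) ↔ r ∈ ["operator", "admin"] := by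
  rw [rank_cases]; split_ifs <;> simp_all

theorem rank_ge_three (r : String) :
    (pvRankB.getD r 0 ≥ 3) ↔ r = "admin" := by
  rw [rank_cases]; split_ifs <;> simp_all

theorem alt_ge_iff (ur : List String) (k : Int) (hk : 1 ≤ k) :
    (decide (ur.foldl (fun m r => max m (pvRankB.getD (PySem.Str.lower r) 0)) 0 ≥ k)) = true
      ↔ ∃ r ∈ ur, pvRankB.getD (PySem.Str.lower r) 0 ≥ k := by
  rw [decide_eq_true_iff, foldl_max_ge]
  constructor
  · rintro (h | h)
    · omega
    · exact h
  · exact Or.inr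

-- ===== VERDICT (by name: the statement is the Claim_ definition above) =====
theorem claims_has_permission_py_spec : Claim_equal_claims_has_permission_py := by
  intro ur rr _
  unfold Spec_claims_has_permission_py claims_has_permission_py claims_has_permission_py_alt
  by_cases h1 : rr = "read-only"
  · subst h1
    rw [show pvRankB.get? "read-only" = some 1 from by decide]
    simp only [beq_self_eq_true, if_true]
    rw [Bool.eq_iff_iff, inter_nonempty_iff, alt_ge_iff _ _ (by norm_num)]
    simp only [List.mem_map]
    constructor
    · rintro ⟨x, ⟨r, hr, rfl⟩, hx⟩
      exact ⟨r, hr, (rank_ge_one _).mpr hx⟩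
    · rintro ⟨r, hr, h⟩
      exact ⟨PySem.Str.lower r, ⟨r, hr, rfl⟩, (rank_ge_one _).mp h⟩
  · by_cases h2 : rr = "operator"
    · subst h2
      rw [show pvRankB.get? "operator" = some 2 from by decide]
      simp only [beq_self_eq_true, if_true, beq_iff_eq, if_neg h1]
      rw [Bool.eq_iff_iff, inter_nonempty_iff, alt_ge_iff _ _ (by norm_num)]
      simp only [List.mem_map]
      constructor
      · rintro ⟨x, ⟨r, hr, rfl⟩, hx⟩
        exact ⟨r, hr, (rank_ge_two _).mpr hx⟩
      · rintro ⟨r, hr, h⟩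
        exact ⟨PySem.Str.lower r, ⟨r, hr, rfl⟩, (rank_ge_two _).mp h⟩
    · by_cases h3 : rr = "admin"
      · subst h3
        rw [show pvRankB.get? "admin" = some 3 from by decide]
        simp only [beq_iff_eq, if_neg h1, if_neg h2, beq_self_eq_true, if_true]
        rw [Bool.eq_iff_iff, alt_ge_iff _ _ (by norm_num)]
        simp only [PySem.Set.contains, PySem.Set.mem_ofList, List.mem_map,
          List.contains_iff_exists_mem_beq, beq_iff_eq]
        constructor
        · rintro ⟨x, ⟨r, hr, rfl⟩, hx⟩
          exact ⟨r, hr, (rank_ge_three _).mpr hx.symm⟩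
        · rintro ⟨r, hr, h⟩
          exact ⟨PySem.Str.lower r, ⟨r, hr, rfl⟩, ((rank_ge_three _).mp h).symm⟩
      · have hg : pvRankB.get? rr = none := by
          have e1 : ("read-only" == rr) = false := by simp [Ne.symm h1]
          have e2 : ("operator" == rr) = false := by simp [Ne.symm h2]
          have e3 : ("admin" == rr) = false := by simp [Ne.symm h3]
          simp [pvRankB, PySem.Dict.get?, List.find?, e1, e2, e3]
        rw [hg]
        simp [beq_iff_eq, h1, h2, h3]
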